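-- pv_equiv track=rewrite | github.com/shubhamgyd/mission_TCS | Chegg/268_Recycle.py | building
-- ===== SOURCE A (Python) =====
-- building_list = [
--     ['--', '--', 'R3'],
--     ['--', 'S2', 'W2'],
--     ['R4', 'S4', 'G4']]
--
-- def building(type):
--     # If type is recycled return 5
--     if type == "recycled":
--         for recycled in building_list:
--             if "R3" in recycled or "R4" in recycled:
--                 return (5)
--
--     # if type is stone return 3
--     if type == "stone":
--         for stone in building_list:
--             if "S2" in stone or "S4" in stone:
--                 return (3)
--
--     # if type is wood return 6
--     if type == "wood":
--         for wood in building_list: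
--             if "W2" in wood:
--                 return (6)
--     # if type is glass return 4
--     if type == "glass":
--         for glass in building_list:
--             if "G4" in glass:
--                 return (4)
--     # in default cases return 0
--     return 0
-- ===== SOURCE B (Python) =====
-- MATERIAL_VALUE = {"recycled": 5, "stone": 3, "wood": 6, "glass": 4}
--
-- def building(type):
--     return MATERIAL_VALUE.get(type, 0)
-- ===== Notes on version B (the rewrite author's own statement) =====
-- stated objective: idiomatic
-- what changed: B replaces the four per-type branches that each scan the 3x3 building_list for sentinel codes with one constant dict mapping material name to value and a single .get(type, 0); no scan of building_list remains.
import Mathlib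
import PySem

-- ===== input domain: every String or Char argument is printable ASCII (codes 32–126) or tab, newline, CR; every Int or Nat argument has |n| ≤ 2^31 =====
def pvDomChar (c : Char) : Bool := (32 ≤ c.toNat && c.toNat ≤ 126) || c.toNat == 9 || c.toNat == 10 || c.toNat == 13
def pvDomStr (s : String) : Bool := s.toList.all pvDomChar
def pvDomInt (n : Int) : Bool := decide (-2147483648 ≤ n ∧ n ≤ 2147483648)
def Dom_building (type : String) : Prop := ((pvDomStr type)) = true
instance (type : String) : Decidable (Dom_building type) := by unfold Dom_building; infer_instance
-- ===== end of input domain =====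

-- B replaces A's four per-type branches, each scanning the 3x3 table for sentinel codes,
-- with a single constant dict lookup with default 0 (idiomatic).

-- ===== PORT A =====
-- the module-level 3x3 table A scans
def buildingList : List (List String) :=
  [["--", "--", "R3"],
   ["--", "S2", "W2"],
   ["R4", "S4", "G4"]]

-- each 'for' loop of A: walk the rows, return the constant on the first row containing a sentinel
def loopRecycled : List (List String) → Option Int
  | [] => none
  | row :: rest => if row.contains "R3" || row.contains "R4" then some 5 else loopRecycled rest

def loopStone : List (List String) → Option Int
  | [] => none
  | row :: rest => if row.contains "S2" || row.contains "S4" then some 3 else loopStone rest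

def loopWood : List (List String) → Option Int
  | [] => none
  | row :: rest => if row.contains "W2" then some 6 else loopWood rest

def loopGlass : List (List String) → Option Int
  | [] => none
  | row :: rest => if row.contains "G4" then some 4 else loopGlass rest

def building (type : String) : Int :=
  match (if type = "recycled" then loopRecycled buildingList else none) with
  | some r => r
  | none =>
    match (if type = "stone" then loopStone buildingList else none) with
    | some r => r
    | none =>
      match (if type = "wood" then loopWood buildingList else none) with
      | some r => r
      | none =>
        match (if type = "glass" then loopGlass buildingList else none) with
        | some r => r
        | none => 0

-- ===== PORT B =====
-- the constant dict (insertion order) from Source B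
def materialValue : PySem.Dict String Int :=
  PySem.Dict.ofList [("recycled", 5), ("stone", 3), ("wood", 6), ("glass", 4)]

def building_alt (type : String) : Int :=
  PySem.Dict.getD materialValue type 0

-- ===== PRECONDITION & SPEC =====
def Spec_building (type : String) (out : Int) : Prop := out = building_alt type
instance (type : String) (out : Int) : Decidable (Spec_building type out) := by unfold Spec_building; infer_instance

-- ===== CLAIM (what is proved, stated in full; the proofs are below) =====
def Claim_equal_building : Prop := ∀ (type : String), Dom_building type → Spec_building type (building type)

-- ===== LEMMAS AND PROOFS =====

-- ===== VERDICT (by name: the statement is the Claim_ definition above) =====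
theorem building_spec : Claim_equal_building := by
  intro type _
  unfold Spec_building building building_alt
  by_cases h1 : type = "recycled"
  · subst h1; rfl
  · by_cases h2 : type = "stone"
    · subst h2; rfl
    · by_cases h3 : type = "wood"
      · subst h3; rfl
      · by_cases h4 : type = "glass"
        · subst h4; rfl
        · have hm : materialValue = PySem.Dict.mk [("recycled", 5), ("stone", 3), ("wood", 6), ("glass", 4)] := by rfl
          simp [hm, PySem.Dict.getD, h1, h2, h3, h4, Ne.symm h1, Ne.symm h2, Ne.symm h3, Ne.symm h4, PySem.Dict.get?]
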